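-- pv_equiv track=rewrite | github.com/haunglai/odpython | 11/Python 实现【连续出牌数量】/Python 实现【连续出牌数量】.py | dfs
-- ===== SOURCE A (Python) =====
-- def dfs(numbers, colors, last_num, last_color, card):
--     maxdepth = 0
--     for i in range(len(card)):
--         if card[i] != 0:
--             if numbers[i] == last_num or colors[i] == last_color:
--                 card[i] = 0
--                 maxdepth = max(dfs(numbers, colors, numbers[i], colors[i], card), maxdepth)
--                 card[i] = 1
--     return maxdepth + 1
-- ===== SOURCE B (Python) =====
-- def dfs(numbers, colors, last_num, last_color, card):
--     n = len(card)
--     memo = {}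
--
--     def go(mask, ln, lc):
--         key = (mask, ln, lc)
--         if key in memo:
--             return memo[key]
--         best = 0
--         for i in range(n):
--             if (mask >> i) & 1 and (numbers[i] == ln or colors[i] == lc):
--                 r = go(mask ^ (1 << i), numbers[i], colors[i])
--                 if best < r:
--                     best = r
--         memo[key] = best + 1
--         return best + 1
--
--     mask0 = 0
--     for i in range(n):
--         if card[i]:
--             mask0 |= 1 << i
--     return go(mask0, last_num, last_color)
-- ===== Notes on version B (the rewrite author's own statement) =====
-- stated objective: alternative
-- what changed: Replaces A's mutating depth-first search over the card list with a top-down dynamic program on an immutable bitmask of remaining cards, memoized on (mask, last number, last color).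
import Mathlib
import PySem

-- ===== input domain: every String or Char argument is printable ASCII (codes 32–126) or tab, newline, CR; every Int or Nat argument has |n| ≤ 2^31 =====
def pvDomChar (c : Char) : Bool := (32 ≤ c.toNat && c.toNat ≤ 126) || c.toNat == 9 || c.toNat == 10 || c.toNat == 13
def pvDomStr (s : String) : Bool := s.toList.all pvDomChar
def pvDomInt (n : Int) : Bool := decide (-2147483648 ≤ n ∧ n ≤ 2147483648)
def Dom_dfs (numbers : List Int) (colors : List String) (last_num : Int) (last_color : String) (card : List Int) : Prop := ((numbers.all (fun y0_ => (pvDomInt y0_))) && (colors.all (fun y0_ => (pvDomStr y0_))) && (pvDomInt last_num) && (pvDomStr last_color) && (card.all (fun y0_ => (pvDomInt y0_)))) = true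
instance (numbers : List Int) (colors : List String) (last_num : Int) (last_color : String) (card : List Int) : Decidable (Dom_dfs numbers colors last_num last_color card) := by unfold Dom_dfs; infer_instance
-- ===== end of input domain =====

-- B replaces A's mutating depth-first search over the card list by a top-down
-- dynamic program on an immutable bitmask of remaining cards, memoized on
-- (mask, last number, last color) (alternative algorithm, similar cost overall).
-- A mutates `card` in place (taken entries are restored to 1); the equivalence proved
-- here is about the RETURN value only — B does not mutate its arguments.

-- ===== PORT A =====
-- `fuel` only makes the recursion total: one card is zeroed per level, so
-- `card.length` fuel is never exhausted; the for-loop is the fold over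
-- range(len(card)), carrying the mutated card list and maxdepth.
def dfsA : Nat → List Int → List String → Int → String → List Int → Int
  | 0, _, _, _, _, _ => 1
  | fuel+1, numbers, colors, last_num, last_color, card =>
    let r := (List.range card.length).foldl
      (fun (st : List Int × Int) i =>
        if st.1.getD i 0 ≠ 0 then
          if numbers.getD i 0 = last_num ∨ colors.getD i "" = last_color then
            let card' := st.1.set i 0
            let d := dfsA fuel numbers colors (numbers.getD i 0) (colors.getD i "") card'
            (card'.set i 1, max d st.2)
          else st
        else st) (card, 0)
    r.2 + 1

def dfs (numbers : List Int) (colors : List String) (last_num : Int) (last_color : String) (card : List Int) : Int :=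
  dfsA card.length numbers colors last_num last_color card

-- ===== PORT B =====
-- mask0 |= 1 << i  for the nonzero card positions
def maskOfB (card : List Int) : Nat :=
  (List.range card.length).foldl (fun m i => if card.getD i 0 ≠ 0 then m ||| (1 <<< i) else m) 0

-- go(mask, ln, lc) of Source B with the memo dict threaded through; `fuel` only makes the
-- recursion total (one bit is cleared per level, so card.length fuel is never exhausted).
-- Python's `(mask >> i) & 1` truthiness is exactly Nat.testBit.
def goB : Nat → Nat → List Int → List String → Nat → Int → String →
    PySem.Dict (Nat × Int × String) Int → Int × PySem.Dict (Nat × Int × String) Int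
  | 0, _, _, _, _, _, _, memo => (1, memo)
  | fuel+1, n, numbers, colors, mask, ln, lc, memo =>
    match memo.get? (mask, ln, lc) with
    | some v => (v, memo)
    | none =>
      let st := (List.range n).foldl
        (fun (st : Int × PySem.Dict (Nat × Int × String) Int) i =>
          if mask.testBit i then
            if numbers.getD i 0 = ln ∨ colors.getD i "" = lc then
              let r := goB fuel n numbers colors (mask ^^^ (1 <<< i)) (numbers.getD i 0) (colors.getD i "") st.2
              (if st.1 < r.1 then r.1 else st.1, r.2)
            else st
          else st) (0, memo)
      (st.1 + 1, st.2.insert (mask, ln, lc) (st.1 + 1))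

def dfs_alt (numbers : List Int) (colors : List String) (last_num : Int) (last_color : String) (card : List Int) : Int :=
  (goB card.length card.length numbers colors (maskOfB card) last_num last_color
    (PySem.Dict.empty : PySem.Dict (Nat × Int × String) Int)).1

-- ===== PRECONDITION & SPEC =====
-- Exactly the inputs on which Python A returns: at every nonzero card position the
-- loop reads numbers[i] and (in the test or in the recursive call's arguments)
-- colors[i], so A raises IndexError iff some nonzero position is out of range of
-- numbers or colors.
def Pre_dfs (numbers : List Int) (colors : List String) (last_num : Int) (last_color : String) (card : List Int) : Prop :=
  ∀ i : Nat, i < card.length → card.getD i 0 ≠ 0 → i < numbers.length ∧ i < colors.length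
instance (numbers : List Int) (colors : List String) (last_num : Int) (last_color : String) (card : List Int) : Decidable (Pre_dfs numbers colors last_num last_color card) := by unfold Pre_dfs; infer_instance

def pvWitness_dfs : List Int × List String × Int × String × List Int :=
  ([1, 2, 3], ["r", "g", "r"], 2, "r", [1, 1, 1])

def Spec_dfs (numbers : List Int) (colors : List String) (last_num : Int) (last_color : String) (card : List Int) (out : Int) : Prop := out = dfs_alt numbers colors last_num last_color card
instance (numbers : List Int) (colors : List String) (last_num : Int) (last_color : String) (card : List Int) (out : Int) : Decidable (Spec_dfs numbers colors last_num last_color card out) := by unfold Spec_dfs; infer_instance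

-- ===== CLAIM (what is proved, stated in full; the proofs are below) =====
def Claim_equal_dfs : Prop := ∀ (numbers : List Int) (colors : List String) (last_num : Int) (last_color : String) (card : List Int), Dom_dfs numbers colors last_num last_color card → Pre_dfs numbers colors last_num last_color card → Spec_dfs numbers colors last_num last_color card (dfs numbers colors last_num last_color card)

-- ===== LEMMAS AND PROOFS =====

-- The pure "game value" of a position: both ports are proved equal to F.
-- F fuel n numbers colors mask ln lc = longest chain from (mask, ln, lc) + 1.
def F : Nat → Nat → List Int → List String → Nat → Int → String → Int
  | 0, _, _, _, _, _, _ => 1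
  | fuel+1, n, numbers, colors, mask, ln, lc =>
    ((List.range n).foldl
      (fun best i =>
        if mask.testBit i then
          if numbers.getD i 0 = ln ∨ colors.getD i "" = lc then
            max (F fuel n numbers colors (mask ^^^ (1 <<< i)) (numbers.getD i 0) (colors.getD i "")) best
          else best
        else best) 0) + 1

-- number of set bits of mask below n
def pc (n mask : Nat) : Nat := (List.range n).countP mask.testBit

lemma foldl_keep {α β : Type} (l : List α) (b : β) : l.foldl (fun a _ => a) b = b := by
  induction l generalizing b <;> simp_all

lemma testBit_shl_one (i j : Nat) : (1 <<< i).testBit j = decide (i = j) := by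
  rw [Nat.shiftLeft_eq, one_mul, Nat.testBit_two_pow]

lemma testBit_clear {mask : Nat} {i : Nat} (h : mask.testBit i = true) (j : Nat) :
    (mask ^^^ (1 <<< i)).testBit j = if j = i then false else mask.testBit j := by
  rw [Nat.testBit_xor, testBit_shl_one]
  by_cases hj : j = i
  · simp [hj, h]
  · simp [hj, Ne.symm hj]

lemma getD_set_self (l : List Int) (i : Nat) (v : Int) (h : i < l.length) :
    (l.set i v).getD i 0 = v := by
  simp [List.getD_eq_getElem?_getD, h]

lemma getD_set_ne (l : List Int) {i j : Nat} (v : Int) (h : i ≠ j) :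
    (l.set i v).getD j 0 = l.getD j 0 := by
  simp [List.getD_eq_getElem?_getD, List.getElem?_set_ne h]

lemma countP_lt_aux (p q : Nat → Bool) :
    ∀ (l : List Nat), (∀ x ∈ l, q x = true → p x = true) →
    ∀ i ∈ l, p i = true → q i = false → l.countP q < l.countP p := by
  intro l
  induction l with
  | nil => intro _ i hi; cases hi
  | cons a t ih =>
    intro hmono i hi hp hq
    rw [List.countP_cons, List.countP_cons]
    rcases List.mem_cons.mp hi with rfl | hit
    · have hle : t.countP q ≤ t.countP p :=
        List.countP_mono_left (fun x hx => by
          intro h; exact hmono x (List.mem_cons_of_mem _ hx) h)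
      have e1 : (if p i then 1 else 0) = 1 := by simp [hp]
      have e2 : (if q i then 1 else 0) = 0 := by simp [hq]
      omega
    · have hlt := ih (fun x hx => hmono x (List.mem_cons_of_mem _ hx)) i hit hp hq
      have : (if q a then 1 else 0) ≤ (if p a then 1 else 0) := by
        by_cases hqa : q a = true
        · simp [hqa, hmono a (List.mem_cons_self) hqa]
        · simp [hqa]
      omega

lemma pc_clear {n mask i : Nat} (hi : i < n) (hbit : mask.testBit i = true) :
    pc n (mask ^^^ (1 <<< i)) < pc n mask := by
  apply countP_lt_aux mask.testBit (mask ^^^ (1 <<< i)).testBit (List.range n)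
    ?_ i (List.mem_range.mpr hi) hbit ?_
  · intro x _ hx
    rw [testBit_clear hbit] at hx
    by_cases hxi : x = i
    · simp [hxi] at hx
    · simpa [hxi] using hx
  · rw [testBit_clear hbit]; simp

lemma pc_le (n mask : Nat) : pc n mask ≤ n := by
  have := List.countP_le_length (l := List.range n) (p := mask.testBit)
  simpa [pc] using this

lemma F_one (fuel n : Nat) (nums : List Int) (cols : List String) (mask : Nat) (ln : Int) (lc : String)
    (h : pc n mask = 0) : F fuel n nums cols mask ln lc = 1 := by
  cases fuel with
  | zero => rfl
  | succ f =>
    have hnb : ∀ i ∈ List.range n, mask.testBit i = false := by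
      intro i hi
      have := List.countP_eq_zero.mp h i hi
      simpa using this
    simp only [F]
    rw [PySem.List.foldl_congr_mem _ _ (fun (a : Int) _ => a) 0
      (fun acc x hx => by simp [hnb x hx])]
    rw [foldl_keep]
    norm_num

lemma F_irrel (n : Nat) (nums : List Int) (cols : List String) :
    ∀ f g mask (ln : Int) (lc : String), pc n mask ≤ f → pc n mask ≤ g →
    F f n nums cols mask ln lc = F g n nums cols mask ln lc := by
  intro f
  induction f with
  | zero =>
    intro g mask ln lc h1 h2
    rw [F_one 0 n nums cols mask ln lc (Nat.le_zero.mp h1),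
        F_one g n nums cols mask ln lc (Nat.le_zero.mp h1)]
  | succ f ih =>
    intro g mask ln lc h1 h2
    by_cases h0 : pc n mask = 0
    · rw [F_one _ n nums cols mask ln lc h0, F_one _ n nums cols mask ln lc h0]
    · obtain ⟨g', rfl⟩ : ∃ g', g = g' + 1 := ⟨g - 1, by omega⟩
      simp only [F]
      congr 1
      apply PySem.List.foldl_congr_mem
      intro acc i hi
      have hi' := List.mem_range.mp hi
      by_cases hbit : mask.testBit i = true
      · by_cases helig : nums.getD i 0 = ln ∨ cols.getD i "" = lc
        · have hlt := pc_clear hi' hbit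
          have heq := ih g' (mask ^^^ (1 <<< i)) (nums.getD i 0) (cols.getD i "")
            (by omega) (by omega)
          simp only [hbit, if_true, if_pos helig, heq]
        · simp only [hbit, if_true, if_neg helig]
      · have hb : mask.testBit i = false := by simpa using hbit
        simp only [hb, Bool.false_eq_true, if_false]

-- ===== A-side: dfsA equals F =====

lemma loopA_eq (f n : Nat) (nums : List Int) (cols : List String) (ln : Int) (lc : String)
    (Hf : ∀ (a : Int) (b : String) (card : List Int) (mask : Nat), card.length = n →
      (∀ j, j < n → (mask.testBit j = true ↔ card.getD j 0 ≠ 0)) →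
      dfsA f nums cols a b card = F f n nums cols mask a b)
    (mask : Nat) :
    ∀ (l : List Nat), (∀ i ∈ l, i < n) →
    ∀ (card : List Int) (acc : Int), card.length = n →
    (∀ j, j < n → (mask.testBit j = true ↔ card.getD j 0 ≠ 0)) →
    (l.foldl
      (fun (st : List Int × Int) i =>
        if st.1.getD i 0 ≠ 0 then
          if nums.getD i 0 = ln ∨ cols.getD i "" = lc then
            let card' := st.1.set i 0
            let d := dfsA f nums cols (nums.getD i 0) (cols.getD i "") card'
            (card'.set i 1, max d st.2)
          else st
        else st) (card, acc)).2
    = l.foldl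
      (fun best i =>
        if mask.testBit i then
          if nums.getD i 0 = ln ∨ cols.getD i "" = lc then
            max (F f n nums cols (mask ^^^ (1 <<< i)) (nums.getD i 0) (cols.getD i "")) best
          else best
        else best) acc := by
  intro l
  induction l with
  | nil => intros; rfl
  | cons i t ih =>
    intro hl card acc hlen hrel
    have hi : i < n := hl i List.mem_cons_self
    have hreli := hrel i hi
    rw [List.foldl_cons, List.foldl_cons]
    by_cases hbit : mask.testBit i = true
    · have hcard : card.getD i 0 ≠ 0 := hreli.mp hbit
      by_cases helig : nums.getD i 0 = ln ∨ cols.getD i "" = lc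
      · have hstepA : (if (card, acc).1.getD i 0 ≠ 0 then
              if nums.getD i 0 = ln ∨ cols.getD i "" = lc then
                let card' := (card, acc).1.set i 0
                let d := dfsA f nums cols (nums.getD i 0) (cols.getD i "") card'
                (card'.set i 1, max d (card, acc).2)
              else (card, acc)
            else (card, acc))
            = ((card.set i 0).set i 1,
               max (dfsA f nums cols (nums.getD i 0) (cols.getD i "") (card.set i 0)) acc) := by
          simp only [if_pos hcard, if_pos helig]
        have hstepF : (if mask.testBit i then
              if nums.getD i 0 = ln ∨ cols.getD i "" = lc then
                max (F f n nums cols (mask ^^^ (1 <<< i)) (nums.getD i 0) (cols.getD i "")) acc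
              else acc
            else acc)
            = max (F f n nums cols (mask ^^^ (1 <<< i)) (nums.getD i 0) (cols.getD i "")) acc := by
          simp only [hbit, if_pos helig, if_true]
        rw [hstepA, hstepF]
        have hlen' : (card.set i 0).length = n := by simp [hlen]
        have hrel' : ∀ j, j < n → ((mask ^^^ (1 <<< i)).testBit j = true ↔ (card.set i 0).getD j 0 ≠ 0) := by
          intro j hj
          rw [testBit_clear hbit]
          by_cases hji : j = i
          · subst hji
            rw [getD_set_self card j 0 (by omega)]
            simp
          · rw [getD_set_ne card 0 (fun h => hji h.symm)]
            simp [hji, hrel j hj]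
        have hd := Hf (nums.getD i 0) (cols.getD i "") (card.set i 0) (mask ^^^ (1 <<< i)) hlen' hrel'
        have hlen'' : ((card.set i 0).set i 1).length = n := by simp [hlen]
        have hrel'' : ∀ j, j < n → (mask.testBit j = true ↔ ((card.set i 0).set i 1).getD j 0 ≠ 0) := by
          intro j hj
          by_cases hji : j = i
          · subst hji
            rw [getD_set_self _ j 1 (by simp [hlen]; omega)]
            simp [hbit]
          · rw [getD_set_ne _ 1 (fun h => hji h.symm), getD_set_ne card 0 (fun h => hji h.symm)]
            exact hrel j hj
        rw [ih (fun x hx => hl x (List.mem_cons_of_mem _ hx)) _ _ hlen'' hrel'']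
        rw [hd]
      · have hstepA : (if (card, acc).1.getD i 0 ≠ 0 then
              if nums.getD i 0 = ln ∨ cols.getD i "" = lc then
                let card' := (card, acc).1.set i 0
                let d := dfsA f nums cols (nums.getD i 0) (cols.getD i "") card'
                (card'.set i 1, max d (card, acc).2)
              else (card, acc)
            else (card, acc)) = (card, acc) := by
          simp only [if_pos hcard, if_neg helig]
        have hstepF : (if mask.testBit i then
              if nums.getD i 0 = ln ∨ cols.getD i "" = lc then
                max (F f n nums cols (mask ^^^ (1 <<< i)) (nums.getD i 0) (cols.getD i "")) acc
              else acc
            else acc) = acc := by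
          simp only [hbit, if_neg helig, if_true]
        rw [hstepA, hstepF]
        exact ih (fun x hx => hl x (List.mem_cons_of_mem _ hx)) card acc hlen hrel
    · have hb : mask.testBit i = false := by simpa using hbit
      have hcard : ¬ card.getD i 0 ≠ 0 := fun h => by simp [hreli.mpr h] at hb
      have hstepA : (if (card, acc).1.getD i 0 ≠ 0 then
            if nums.getD i 0 = ln ∨ cols.getD i "" = lc then
              let card' := (card, acc).1.set i 0
              let d := dfsA f nums cols (nums.getD i 0) (cols.getD i "") card'
              (card'.set i 1, max d (card, acc).2)
            else (card, acc)
          else (card, acc)) = (card, acc) := by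
        simp only [if_neg hcard]
      have hstepF : (if mask.testBit i then
            if nums.getD i 0 = ln ∨ cols.getD i "" = lc then
              max (F f n nums cols (mask ^^^ (1 <<< i)) (nums.getD i 0) (cols.getD i "")) acc
            else acc
          else acc) = acc := by
        simp only [hb, Bool.false_eq_true, if_false]
      rw [hstepA, hstepF]
      exact ih (fun x hx => hl x (List.mem_cons_of_mem _ hx)) card acc hlen hrel

lemma dfsA_eq_F (nums : List Int) (cols : List String) :
    ∀ (f n : Nat) (a : Int) (b : String) (card : List Int) (mask : Nat), card.length = n →
    (∀ j, j < n → (mask.testBit j = true ↔ card.getD j 0 ≠ 0)) →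
    dfsA f nums cols a b card = F f n nums cols mask a b := by
  intro f
  induction f with
  | zero => intros; rfl
  | succ f ih =>
    intro n a b card mask hlen hrel
    subst hlen
    simp only [dfsA, F]
    congr 1
    exact loopA_eq f card.length nums cols a b
      (fun a b c m hl hr => ih card.length a b c m hl hr) mask
      (List.range card.length) (fun x hx => List.mem_range.mp hx) card 0 rfl hrel

-- ===== B-side: goB equals F =====

def MemoInv (n : Nat) (nums : List Int) (cols : List String)
    (memo : PySem.Dict (Nat × Int × String) Int) : Prop :=
  ∀ mask ln lc v, memo.get? (mask, ln, lc) = some v → v = F n n nums cols mask ln lc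

lemma max_eq_if (a b : Int) : (if b < a then a else b) = max a b := by
  rw [max_def]; split_ifs <;> omega

lemma loopB_eq (f n : Nat) (nums : List Int) (cols : List String) (mask : Nat)
    (ln : Int) (lc : String)
    (Hrec : ∀ m (a : Int) (b : String) memo, pc n m ≤ f → MemoInv n nums cols memo →
      (goB f n nums cols m a b memo).1 = F n n nums cols m a b ∧
      MemoInv n nums cols (goB f n nums cols m a b memo).2) :
    ∀ (l : List Nat),
    (∀ i ∈ l, mask.testBit i = true → pc n (mask ^^^ (1 <<< i)) ≤ f) →
    ∀ (st : Int × PySem.Dict (Nat × Int × String) Int), MemoInv n nums cols st.2 →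
    (l.foldl
      (fun (st : Int × PySem.Dict (Nat × Int × String) Int) i =>
        if mask.testBit i then
          if nums.getD i 0 = ln ∨ cols.getD i "" = lc then
            let r := goB f n nums cols (mask ^^^ (1 <<< i)) (nums.getD i 0) (cols.getD i "") st.2
            (if st.1 < r.1 then r.1 else st.1, r.2)
          else st
        else st) st).1
    = l.foldl
      (fun (best : Int) i =>
        if mask.testBit i then
          if nums.getD i 0 = ln ∨ cols.getD i "" = lc then
            if best < F n n nums cols (mask ^^^ (1 <<< i)) (nums.getD i 0) (cols.getD i "") then
              F n n nums cols (mask ^^^ (1 <<< i)) (nums.getD i 0) (cols.getD i "")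
            else best
          else best
        else best) st.1
    ∧ MemoInv n nums cols
      (l.foldl
        (fun (st : Int × PySem.Dict (Nat × Int × String) Int) i =>
          if mask.testBit i then
            if nums.getD i 0 = ln ∨ cols.getD i "" = lc then
              let r := goB f n nums cols (mask ^^^ (1 <<< i)) (nums.getD i 0) (cols.getD i "") st.2
              (if st.1 < r.1 then r.1 else st.1, r.2)
            else st
          else st) st).2 := by
  intro l
  induction l with
  | nil => intro _ st hst; exact ⟨rfl, hst⟩
  | cons i t ih =>
    intro hpc st hst
    rw [List.foldl_cons, List.foldl_cons]
    by_cases hbit : mask.testBit i = true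
    · by_cases helig : nums.getD i 0 = ln ∨ cols.getD i "" = lc
      · obtain ⟨hr1, hr2⟩ := Hrec (mask ^^^ (1 <<< i)) (nums.getD i 0) (cols.getD i "") st.2
          (hpc i List.mem_cons_self hbit) hst
        have hstepB : (if mask.testBit i then
              if nums.getD i 0 = ln ∨ cols.getD i "" = lc then
                let r := goB f n nums cols (mask ^^^ (1 <<< i)) (nums.getD i 0) (cols.getD i "") st.2
                (if st.1 < r.1 then r.1 else st.1, r.2)
              else st
            else st)
            = (if st.1 < F n n nums cols (mask ^^^ (1 <<< i)) (nums.getD i 0) (cols.getD i "") then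
                 F n n nums cols (mask ^^^ (1 <<< i)) (nums.getD i 0) (cols.getD i "")
               else st.1,
               (goB f n nums cols (mask ^^^ (1 <<< i)) (nums.getD i 0) (cols.getD i "") st.2).2) := by
          simp only [hbit, if_pos helig, if_true, hr1]
        have hstepP : (if mask.testBit i then
              if nums.getD i 0 = ln ∨ cols.getD i "" = lc then
                if st.1 < F n n nums cols (mask ^^^ (1 <<< i)) (nums.getD i 0) (cols.getD i "") then
                  F n n nums cols (mask ^^^ (1 <<< i)) (nums.getD i 0) (cols.getD i "")
                else st.1
              else st.1
            else st.1)
            = (if st.1 < F n n nums cols (mask ^^^ (1 <<< i)) (nums.getD i 0) (cols.getD i "") then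
                 F n n nums cols (mask ^^^ (1 <<< i)) (nums.getD i 0) (cols.getD i "")
               else st.1) := by
          simp only [hbit, if_pos helig, if_true]
        rw [hstepB, hstepP]
        exact ih (fun x hx => hpc x (List.mem_cons_of_mem _ hx)) _ hr2
      · have hstepB : (if mask.testBit i then
              if nums.getD i 0 = ln ∨ cols.getD i "" = lc then
                let r := goB f n nums cols (mask ^^^ (1 <<< i)) (nums.getD i 0) (cols.getD i "") st.2
                (if st.1 < r.1 then r.1 else st.1, r.2)
              else st
            else st) = st := by
          simp only [hbit, if_neg helig, if_true]
        have hstepP : (if mask.testBit i then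
              if nums.getD i 0 = ln ∨ cols.getD i "" = lc then
                if st.1 < F n n nums cols (mask ^^^ (1 <<< i)) (nums.getD i 0) (cols.getD i "") then
                  F n n nums cols (mask ^^^ (1 <<< i)) (nums.getD i 0) (cols.getD i "")
                else st.1
              else st.1
            else st.1) = st.1 := by
          simp only [hbit, if_neg helig, if_true]
        rw [hstepB, hstepP]
        exact ih (fun x hx => hpc x (List.mem_cons_of_mem _ hx)) st hst
    · have hb : mask.testBit i = false := by simpa using hbit
      have hstepB : (if mask.testBit i then
            if nums.getD i 0 = ln ∨ cols.getD i "" = lc then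
              let r := goB f n nums cols (mask ^^^ (1 <<< i)) (nums.getD i 0) (cols.getD i "") st.2
              (if st.1 < r.1 then r.1 else st.1, r.2)
            else st
          else st) = st := by
        simp only [hb, Bool.false_eq_true, if_false]
      have hstepP : (if mask.testBit i then
            if nums.getD i 0 = ln ∨ cols.getD i "" = lc then
              if st.1 < F n n nums cols (mask ^^^ (1 <<< i)) (nums.getD i 0) (cols.getD i "") then
                F n n nums cols (mask ^^^ (1 <<< i)) (nums.getD i 0) (cols.getD i "")
              else st.1
            else st.1
          else st.1) = st.1 := by
        simp only [hb, Bool.false_eq_true, if_false]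
      rw [hstepB, hstepP]
      exact ih (fun x hx => hpc x (List.mem_cons_of_mem _ hx)) st hst

lemma goB_correct (n : Nat) (nums : List Int) (cols : List String) :
    ∀ (f : Nat) (mask : Nat) (ln : Int) (lc : String) memo, pc n mask ≤ f → MemoInv n nums cols memo →
    (goB f n nums cols mask ln lc memo).1 = F n n nums cols mask ln lc ∧
    MemoInv n nums cols (goB f n nums cols mask ln lc memo).2 := by
  intro f
  induction f with
  | zero =>
    intro mask ln lc memo hf hinv
    have h0 : pc n mask = 0 := Nat.le_zero.mp hf
    exact ⟨(F_one n n nums cols mask ln lc h0).symm, hinv⟩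
  | succ f ih =>
    intro mask ln lc memo hf hinv
    simp only [goB]
    cases hget : memo.get? (mask, ln, lc) with
    | some v =>
      exact ⟨hinv mask ln lc v hget, hinv⟩
    | none =>
      obtain ⟨h1, h2⟩ := loopB_eq f n nums cols mask ln lc
        (fun m a b memo hm hi => ih m a b memo hm hi)
        (List.range n)
        (fun i hi hbit => by
          have := pc_clear (List.mem_range.mp hi) hbit
          omega)
        (0, memo) hinv
      have hpure : (List.range n).foldl
          (fun (best : Int) i =>
            if mask.testBit i then
              if nums.getD i 0 = ln ∨ cols.getD i "" = lc then
                if best < F n n nums cols (mask ^^^ (1 <<< i)) (nums.getD i 0) (cols.getD i "") then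
                  F n n nums cols (mask ^^^ (1 <<< i)) (nums.getD i 0) (cols.getD i "")
                else best
              else best
            else best) 0
          = (List.range n).foldl
          (fun (best : Int) i =>
            if mask.testBit i then
              if nums.getD i 0 = ln ∨ cols.getD i "" = lc then
                max (F f n nums cols (mask ^^^ (1 <<< i)) (nums.getD i 0) (cols.getD i "")) best
              else best
            else best) 0 := by
        apply PySem.List.foldl_congr_mem
        intro acc i hi
        by_cases hbit : mask.testBit i = true
        · by_cases helig : nums.getD i 0 = ln ∨ cols.getD i "" = lc
          · have hirr : F n n nums cols (mask ^^^ (1 <<< i)) (nums.getD i 0) (cols.getD i "")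
                = F f n nums cols (mask ^^^ (1 <<< i)) (nums.getD i 0) (cols.getD i "") := by
              have hlt := pc_clear (List.mem_range.mp hi) hbit
              exact F_irrel n nums cols n f _ _ _
                (pc_le n _) (by omega)
            simp only [hbit, if_pos helig, if_true, hirr, max_eq_if]
          · simp only [hbit, if_neg helig, if_true]
        · have hb : mask.testBit i = false := by simpa using hbit
          simp only [hb, if_false, Bool.false_eq_true]
      have hF : F (f + 1) n nums cols mask ln lc
          = ((List.range n).foldl
              (fun (best : Int) i =>
                if mask.testBit i then
                  if nums.getD i 0 = ln ∨ cols.getD i "" = lc then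
                    max (F f n nums cols (mask ^^^ (1 <<< i)) (nums.getD i 0) (cols.getD i "")) best
                  else best
                else best) 0) + 1 := rfl
      have hcanon : F n n nums cols mask ln lc = F (f + 1) n nums cols mask ln lc :=
        F_irrel n nums cols n (f + 1) mask ln lc (pc_le n mask) hf
      constructor
      · show (_ , _).1 = _
        simp only []
        rw [h1, hpure, hcanon, hF]
      · show MemoInv n nums cols (_, _).2
        simp only []
        intro m a b v hv
        rw [PySem.Dict.get?_insert] at hv
        by_cases hk : (m, a, b) = (mask, ln, lc)
        · rw [if_pos hk] at hv
          cases hv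
          obtain ⟨rfl, rfl, rfl⟩ : m = mask ∧ a = ln ∧ b = lc := by
            simpa [Prod.ext_iff] using hk
          rw [h1, hpure, hcanon, hF]
        · rw [if_neg hk] at hv
          exact h2 m a b v hv

-- ===== mask built by B's first loop =====

lemma testBit_foldl_or (P : Nat → Prop) [DecidablePred P] :
    ∀ (l : List Nat) (m j : Nat),
    (l.foldl (fun m i => if P i then m ||| (1 <<< i) else m) m).testBit j
      = (m.testBit j || (decide (j ∈ l) && decide (P j))) := by
  intro l
  induction l with
  | nil => intro m j; simp
  | cons a t ih =>
    intro m j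
    simp only [List.foldl_cons]
    by_cases hP : P a
    · rw [if_pos hP, ih, Nat.testBit_lor, testBit_shl_one]
      by_cases hj : j = a
      · subst hj; simp [hP]
      · simp [hj, Ne.symm hj, List.mem_cons]
    · rw [if_neg hP, ih]
      by_cases hj : j = a
      · subst hj; simp [hP, List.mem_cons]
      · simp [hj, List.mem_cons]

lemma testBit_maskOfB (card : List Int) (j : Nat) (hj : j < card.length) :
    (maskOfB card).testBit j = true ↔ card.getD j 0 ≠ 0 := by
  unfold maskOfB
  rw [testBit_foldl_or]
  simp [List.mem_range, hj]

-- ===== VERDICT (by name: the statement is the Claim_ definition above) =====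
theorem dfs_spec : Claim_equal_dfs := by
  intro numbers colors last_num last_color card _ _
  unfold Spec_dfs dfs dfs_alt
  have hrel : ∀ j, j < card.length → ((maskOfB card).testBit j = true ↔ card.getD j 0 ≠ 0) :=
    fun j hj => testBit_maskOfB card j hj
  rw [dfsA_eq_F numbers colors card.length card.length last_num last_color card (maskOfB card) rfl hrel]
  have hinv : MemoInv card.length numbers colors (PySem.Dict.empty : PySem.Dict (Nat × Int × String) Int) := by
    intro mask ln lc v h
    rw [PySem.Dict.get?_empty] at h
    cases h
  exact ((goB_correct card.length numbers colors card.length (maskOfB card) last_num last_color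
    _ (pc_le card.length (maskOfB card)) hinv).1).symm
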